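-- pv_equiv track=rewrite | github.com/alexeib2014/Tests | puzzle.py | get_matrix_resolution
-- ===== SOURCE A (Python) =====
-- def get_matrix_resolution(matrix):
--     """
--     Check the matrix and return resolution
--     :param matrix:
--     :return: (height,widht) or Exception
--     """
--     width = 0
--     height = 0
--     for row in matrix:
--         if not isinstance(row,str):      # check the matrix consist of strings
--             raise Exception
--         if height == 0:
--             width = len(row)         # remember length of the first line...
--         else:
--             if width != len(row):    # ...and compare with others
--                 raise Exception
--         height += 1
--
--     if width == 0 or height == 0:
--         raise Exception
--
--     return height, width
-- ===== SOURCE B (Python) =====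
-- def get_matrix_resolution(matrix):
--     rows = list(matrix)
--     if not all(isinstance(r, str) for r in rows):
--         raise Exception
--     widths = {len(r) for r in rows}
--     if len(widths) != 1:
--         raise Exception
--     width = widths.pop()
--     height = len(rows)
--     if width == 0 or height == 0:
--         raise Exception
--     return height, width
-- ===== Notes on version B (the rewrite author's own statement) =====
-- stated objective: simpler
-- what changed: Replaces A's stateful remember-first-then-compare loop (width/height accumulators with a height==0 branch) by building the set of row lengths once and checking it is a singleton; height is just len(rows).
import Mathlib
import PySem

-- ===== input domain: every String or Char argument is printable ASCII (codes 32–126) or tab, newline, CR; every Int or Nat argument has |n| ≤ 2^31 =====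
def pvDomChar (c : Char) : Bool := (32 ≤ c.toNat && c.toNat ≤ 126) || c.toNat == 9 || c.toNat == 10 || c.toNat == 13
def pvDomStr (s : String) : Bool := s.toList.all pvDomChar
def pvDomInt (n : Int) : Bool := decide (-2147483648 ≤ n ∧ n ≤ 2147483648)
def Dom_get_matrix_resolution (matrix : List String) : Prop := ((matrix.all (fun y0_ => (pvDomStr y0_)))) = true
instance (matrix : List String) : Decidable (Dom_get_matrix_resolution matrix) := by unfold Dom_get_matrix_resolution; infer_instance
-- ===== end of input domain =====

-- ===== PORT A =====
-- B changes the decomposition: A's compare-to-first loop becomes a set-of-lengths singleton check (objective: simpler).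
-- A's loop: carries (width, height); none models the 'raise' inside the loop.
def pvALoop_get_matrix_resolution : List String → Int → Int → Option (Int × Int)
  | [], width, height => some (width, height)
  | row :: rest, width, height =>
      if height = 0 then
        pvALoop_get_matrix_resolution rest (PySem.Str.len row) (height + 1)
      else if width ≠ PySem.Str.len row then
        none
      else
        pvALoop_get_matrix_resolution rest width (height + 1)

def get_matrix_resolution (matrix : List String) : Int × Int :=
  match pvALoop_get_matrix_resolution matrix 0 0 with
  | none => (0, 0)            -- A raises here (excluded by Pre_)
  | some (width, height) =>
      if width = 0 ∨ height = 0 then (0, 0)   -- A raises here (excluded by Pre_)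
      else (height, width)

-- ===== PORT B =====
def get_matrix_resolution_alt (matrix : List String) : Int × Int :=
  let widths : PySem.Set Int := PySem.Set.ofList (matrix.map PySem.Str.len)
  if h : widths.length ≠ 1 then (0, 0)        -- B raises here (excluded by Pre_)
  else
    let width := widths.headI                 -- widths.pop() on a singleton set
    let height : Int := matrix.length
    if width = 0 ∨ height = 0 then (0, 0)     -- B raises here (excluded by Pre_)
    else (height, width)

-- ===== PRECONDITION & SPEC =====
-- Pre_ excludes exactly the inputs where A raises: an empty matrix, rows of unequal length, or a first row of length 0.
def Pre_get_matrix_resolution (matrix : List String) : Prop :=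
  matrix ≠ [] ∧ PySem.Str.len matrix.headI ≠ 0 ∧
    ∀ s ∈ matrix, PySem.Str.len s = PySem.Str.len matrix.headI
instance (matrix : List String) : Decidable (Pre_get_matrix_resolution matrix) := by
  unfold Pre_get_matrix_resolution; infer_instance

def pvWitness_get_matrix_resolution : List String := ["ab", "cd", "ef"]

def Spec_get_matrix_resolution (matrix : List String) (out : Int × Int) : Prop := out = get_matrix_resolution_alt matrix
instance (matrix : List String) (out : Int × Int) : Decidable (Spec_get_matrix_resolution matrix out) := by unfold Spec_get_matrix_resolution; infer_instance

-- ===== CLAIM (what is proved, stated in full; the proofs are below) =====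
def Claim_equal_get_matrix_resolution : Prop := ∀ (matrix : List String), Dom_get_matrix_resolution matrix → Pre_get_matrix_resolution matrix → Spec_get_matrix_resolution matrix (get_matrix_resolution matrix)

-- ===== LEMMAS AND PROOFS =====

-- A's loop, after the first row set width = w, just counts rows when all lengths equal w.
theorem pvALoop_const (rs : List String) (w : Int) (h : Int) (hh : 0 < h)
    (hall : ∀ s ∈ rs, PySem.Str.len s = w) :
    pvALoop_get_matrix_resolution rs w h = some (w, h + rs.length) := by
  induction rs generalizing h with
  | nil => simp [pvALoop_get_matrix_resolution]
  | cons r rest ih =>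
      have hr : (r.length : Int) = w := by
        simpa [PySem.Str.len_eq] using hall r (by simp)
      have step : pvALoop_get_matrix_resolution (r :: rest) w h =
          pvALoop_get_matrix_resolution rest w (h + 1) := by
        simp [pvALoop_get_matrix_resolution, hh.ne', hr]
      rw [step, ih (h + 1) (by omega) (fun s hs => hall s (by simp [hs]))]
      congr 2
      simp only [List.length_cons]
      push_cast; ring

-- set(xs) of a nonempty constant list is the singleton.
theorem set_ofList_const (xs : List Int) (w : Int) (hall : ∀ x ∈ xs, x = w) (hne : xs ≠ []) :
    PySem.Set.ofList xs = [w] := by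
  rcases xs with _ | ⟨x, rest⟩
  · simp at hne
  · have hx : x = w := hall x (by simp)
    subst hx
    have key : ∀ (l : List Int), (∀ z ∈ l, z = x) → l.foldl PySem.Set.add [x] = [x] := by
      intro l
      induction l with
      | nil => intro _; rfl
      | cons a as iha =>
          intro hl
          have ha : a = x := hl a (by simp)
          subst ha
          have hadd : PySem.Set.add [a] a = [a] := by
            simp [PySem.Set.add, PySem.Set.contains]
          simpa [List.foldl, hadd] using iha (fun z hz => hl z (by simp [hz]))
    have h1 : PySem.Set.ofList (x :: rest) = rest.foldl PySem.Set.add (PySem.Set.add [] x) := by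
      rw [PySem.Set.ofList_eq_foldl]; rfl
    rw [h1]
    have h2 : PySem.Set.add ([] : PySem.Set Int) x = [x] := rfl
    rw [h2]
    exact key rest (fun z hz => hall z (by simp [hz]))

-- ===== VERDICT (by name: the statement is the Claim_ definition above) =====
theorem get_matrix_resolution_spec : Claim_equal_get_matrix_resolution := by
  intro matrix _hdom hpre
  unfold Spec_get_matrix_resolution
  obtain ⟨hne, hr0, hall⟩ := hpre
  rcases matrix with _ | ⟨r, rs⟩
  · simp at hne
  · simp only [List.headI] at hr0 hall
    -- A's side
    have hA : pvALoop_get_matrix_resolution (r :: rs) 0 0 =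
        some (PySem.Str.len r, 1 + (rs.length : Int)) := by
      have step : pvALoop_get_matrix_resolution (r :: rs) 0 0 =
          pvALoop_get_matrix_resolution rs (PySem.Str.len r) 1 := by
        simp [pvALoop_get_matrix_resolution]
      rw [step, pvALoop_const rs (PySem.Str.len r) 1 (by norm_num)
        (fun s hs => hall s (by simp [hs]))]
    -- B's side
    have hset : PySem.Set.ofList ((r :: rs).map PySem.Str.len) = [PySem.Str.len r] := by
      apply set_ofList_const
      · intro x hx
        simp only [List.mem_map] at hx
        obtain ⟨s, hs, hsx⟩ := hx
        rw [← hsx]; exact hall s hs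
      · simp
    unfold get_matrix_resolution get_matrix_resolution_alt
    rw [hA, hset]
    have hwpos : PySem.Str.len r ≠ 0 := hr0
    have hnotor : ¬ (PySem.Str.len r = 0 ∨ (1 : Int) + (rs.length : Int) = 0) := by
      push Not; exact ⟨hwpos, by positivity⟩
    simp only [List.length_singleton, List.headI, List.length_cons]
    rw [if_neg hnotor]
    rw [dif_neg (by simp)]
    have hnotor2 : ¬ (PySem.Str.len r = 0 ∨ ((rs.length : Int) + 1) = 0) := by
      push Not; exact ⟨hwpos, by positivity⟩
    simp only [Nat.cast_add, Nat.cast_one]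
    rw [if_neg hnotor2]
    have : (1 : Int) + (rs.length : Int) = (rs.length : Int) + 1 := by ring
    rw [this]
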